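-- pv_equiv track=rewrite | github.com/komajun365/competitive_programming | arc/arc084/e/main.py | calc
-- ===== SOURCE A (Python) =====
-- def calc(k,n,x):
--     # k**n が6*10**10以下のとき、x番目を返す
--     one = 0
--     for i in range(n):
--         one += k**i
--
--     top = (x-1) // one + 1
--     x -= (top-1) * one + 1
--     if x == 0:
--         return [top]
--     else:
--         return [top] + calc(k,n-1,x)
-- ===== SOURCE B (Python) =====
-- def calc(k, n, x):
--     # Iterative: one power evaluation gives the outermost block size in closed
--     # form; each smaller geometric sum is then recovered by the exact division
--     # (one - 1) // k, so no per-level summation or power is ever redone.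
--     one = n if k == 1 else (k ** n - 1) // (k - 1)
--     res = []
--     while True:
--         top = (x - 1) // one
--         rem = (x - 1) % one
--         res.append(top + 1)
--         if rem == 0:
--             return res
--         x = rem
--         one = (one - 1) // k
-- ===== Notes on version B (the rewrite author's own statement) =====
-- stated objective: faster
-- what changed: Replaced the recursion with a per-level summation loop of powers (O(n^2) big-int power evaluations) by an iterative loop that computes the outermost geometric block size once in closed form and then shrinks it each level by the exact division (one-1)//k, extracting each digit with a single floordiv/mod pair.
import Mathlib
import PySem

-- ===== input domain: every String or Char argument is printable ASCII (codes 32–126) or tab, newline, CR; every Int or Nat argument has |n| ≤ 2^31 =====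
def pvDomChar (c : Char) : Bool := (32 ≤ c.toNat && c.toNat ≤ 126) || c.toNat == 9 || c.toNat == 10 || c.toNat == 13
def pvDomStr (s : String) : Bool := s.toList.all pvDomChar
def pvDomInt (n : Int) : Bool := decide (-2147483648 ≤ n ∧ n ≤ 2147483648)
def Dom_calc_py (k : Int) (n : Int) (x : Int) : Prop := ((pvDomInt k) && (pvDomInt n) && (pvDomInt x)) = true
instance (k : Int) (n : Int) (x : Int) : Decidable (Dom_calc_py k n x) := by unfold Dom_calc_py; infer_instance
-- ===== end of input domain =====

-- B replaces A's recursion + per-level summation of powers by an iterative loop that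
-- computes the outermost block size once in closed form and shrinks it by the exact
-- division (one-1)//k each level (objective: faster, fewer big-int power evaluations).


-- ===== PORT A =====
-- fuel = n.toNat bounds the recursion depth: the Python recursion decreases n by 1 each
-- call and (inside Pre_) always returns at n = 1, so the fuel is never exhausted there.
def calcAux (fuel : Nat) (k n x : Int) : List Int :=
  match fuel with
  | 0 => []
  | fuel + 1 =>
    let one := (PySem.List.pyRange 0 n 1).foldl (fun a i => a + k ^ i.toNat) 0
    let top := PySem.Int.floordiv (x - 1) one + 1
    let x' := x - ((top - 1) * one + 1)
    if x' = 0 then [top] else top :: calcAux fuel k (n - 1) x'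

def calc_py (k : Int) (n : Int) (x : Int) : List Int := calcAux n.toNat k n x

-- ===== PORT B =====
-- fuel = n.toNat bounds the while-loop (inside Pre_ the loop exits within n iterations).
def calcAltAux (fuel : Nat) (k one x : Int) (res : List Int) : List Int :=
  match fuel with
  | 0 => res
  | fuel + 1 =>
    let top := PySem.Int.floordiv (x - 1) one
    let rem := PySem.Int.mod (x - 1) one
    let res' := res ++ [top + 1]
    if rem = 0 then res'
    else calcAltAux fuel k (PySem.Int.floordiv (one - 1) k) rem res'

def calc_py_alt (k : Int) (n : Int) (x : Int) : List Int :=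
  calcAltAux n.toNat k (if k = 1 then n else PySem.Int.floordiv (k ^ n.toNat - 1) (k - 1)) x []

-- ===== PRECONDITION & SPEC =====
-- Pre_ excludes exactly the inputs where A raises ZeroDivisionError: n ≤ 0 (the geometric
-- sum 'one' is 0), and k = -1 with n even (the alternating sum 'one' is 0).
def Pre_calc_py (k : Int) (n : Int) (x : Int) : Prop := 1 ≤ n ∧ (k = -1 → n % 2 = 1)
instance (k : Int) (n : Int) (x : Int) : Decidable (Pre_calc_py k n x) := by unfold Pre_calc_py; infer_instance
def pvWitness_calc_py : Int × Int × Int := (2, 3, 5)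

def Spec_calc_py (k : Int) (n : Int) (x : Int) (out : List Int) : Prop := out = calc_py_alt k n x
instance (k : Int) (n : Int) (x : Int) (out : List Int) : Decidable (Spec_calc_py k n x out) := by unfold Spec_calc_py; infer_instance

-- ===== CLAIM (what is proved, stated in full; the proofs are below) =====
def Claim_equal_calc_py : Prop := ∀ (k : Int) (n : Int) (x : Int), Dom_calc_py k n x → Pre_calc_py k n x → Spec_calc_py k n x (calc_py k n x)

-- ===== LEMMAS AND PROOFS =====

-- the geometric sum ∑_{j<m} k^j, the common reference value of both programs' 'one'
def pvSum (k : Int) (m : Nat) : Int := (List.range m).foldl (fun a j => a + k ^ j) 0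

theorem pv_sum_succ_last (k : Int) (m : Nat) : pvSum k (m + 1) = pvSum k m + k ^ m := by
  simp [pvSum, List.range_succ]

-- peel the sum at the front: S(m+1) = 1 + k·S(m)
theorem pv_sum_succ (k : Int) (m : Nat) : pvSum k (m + 1) = 1 + k * pvSum k m := by
  induction m with
  | zero => simp [pvSum]
  | succ m ih =>
    rw [pv_sum_succ_last k (m + 1), pow_succ]
    linear_combination ih - k * pv_sum_succ_last k m

theorem pv_sum_one (k : Int) : pvSum k 1 = 1 := by simp [pvSum]

theorem pv_sum_zero_k (m : Nat) (hm : 1 ≤ m) : pvSum 0 m = 1 := by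
  obtain ⟨m', rfl⟩ : ∃ m', m = m' + 1 := ⟨m - 1, by omega⟩
  rw [pv_sum_succ]; ring

-- A's summation loop over range(n) equals pvSum k n.toNat
theorem pv_A_one (k n : Int) :
    (PySem.List.pyRange 0 n 1).foldl (fun a i => a + k ^ i.toNat) 0 = pvSum k n.toNat := by
  rw [PySem.List.pyRange_one]
  rw [List.foldl_map]
  have hf : (fun (a : Int) (j : Nat) => a + k ^ ((0 : Int) + (j : Int)).toNat)
      = fun (a : Int) (j : Nat) => a + k ^ j := by
    funext a j; simp
  simp only [hf, pvSum]
  norm_num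

-- geometric sum times (k-1) telescopes
theorem pv_geom_mul (k : Int) (m : Nat) : pvSum k m * (k - 1) = k ^ m - 1 := by
  induction m with
  | zero => simp [pvSum]
  | succ m ih =>
    rw [pv_sum_succ_last, pow_succ]
    linear_combination ih

-- B's initial closed form equals pvSum k n.toNat
theorem pv_closed_eq_sum (k n : Int) (hn : 1 ≤ n) :
    (if k = 1 then n else PySem.Int.floordiv (k ^ n.toNat - 1) (k - 1)) = pvSum k n.toNat := by
  by_cases hk : k = 1
  · subst hk
    rw [if_pos rfl]
    have : ∀ m : Nat, pvSum 1 m = m := by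
      intro m
      induction m with
      | zero => simp [pvSum]
      | succ m ih => rw [pv_sum_succ_last, ih]; push_cast; ring
    rw [this]; omega
  · rw [if_neg hk]
    have hc : k - 1 ≠ 0 := by intro h; apply hk; omega
    rw [← pv_geom_mul k n.toNat]
    simp [PySem.Int.floordiv]
    exact Int.mul_fdiv_cancel _ hc

-- main alignment: running B's loop with one = S(n) reproduces A's recursion at level n
theorem pv_main (fuel : Nat) : ∀ (k n x : Int) (acc : List Int), 1 ≤ n →
    calcAltAux fuel k (pvSum k n.toNat) x acc = acc ++ calcAux fuel k n x := by
  induction fuel with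
  | zero => intro k n x acc _; simp [calcAux, calcAltAux]
  | succ fuel ih =>
    intro k n x acc hn
    rw [calcAux, calcAltAux]
    rw [pv_A_one]
    set S := pvSum k n.toNat with hS
    set q := PySem.Int.floordiv (x - 1) S with hq
    set r := PySem.Int.mod (x - 1) S with hr
    have hx' : x - ((q + 1 - 1) * S + 1) = r := by
      have := PySem.Int.floordiv_mul_add_mod (x - 1) S
      rw [← hq, ← hr] at this
      linarith
    rw [hx']
    by_cases hz : r = 0
    · simp [hz]
    · simp only [if_neg hz]
      -- from r ≠ 0 deduce k ≠ 0 and n ≥ 2 (else S = 1 and r = (x-1) mod 1 = 0)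
      have hS1 : S ≠ 1 := by
        intro h1
        apply hz
        rw [hr, h1]
        rw [PySem.Int.mod_eq_zero_iff_dvd]
        exact one_dvd _
      have hk0 : k ≠ 0 := by
        intro h0
        exact hS1 (by rw [hS, h0]; exact pv_sum_zero_k n.toNat (by omega))
      have hn2 : 2 ≤ n := by
        rcases lt_or_eq_of_le hn with h | h
        · omega
        · exfalso; exact hS1 (by rw [hS, ← h]; exact pv_sum_one k)
      -- B's updated one equals S(n-1): S(n) - 1 = k·S(n-1), divided exactly by k
      have hstep : PySem.Int.floordiv (S - 1) k = pvSum k (n - 1).toNat := by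
        have hnn : n.toNat = (n - 1).toNat + 1 := by omega
        rw [hS, hnn, pv_sum_succ]
        have : (1 : Int) + k * pvSum k (n - 1).toNat - 1 = k * pvSum k (n - 1).toNat := by ring
        rw [this]
        simp [PySem.Int.floordiv]
        exact Int.mul_fdiv_cancel_left _ hk0
      rw [hstep, ih k (n - 1) r (acc ++ [q + 1]) (by omega)]
      simp

-- ===== VERDICT (by name: the statement is the Claim_ definition above) =====
theorem calc_py_spec : Claim_equal_calc_py := by
  intro k n x _ hpre
  unfold Spec_calc_py calc_py calc_py_alt
  rw [pv_closed_eq_sum k n hpre.1, pv_main n.toNat k n x [] hpre.1]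
  simp
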